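-- pv_equiv track=rewrite | github.com/jackfull2023/folo-telegram-mvp | app.py | match_weighted_terms
-- ===== SOURCE A (Python) =====
-- from typing import Any
--
-- def match_weighted_terms(text: str, terms: dict[str, Any], reason_prefix: str) -> tuple[int, list[str]]:
--     score = 0
--     reasons: list[str] = []
--     text = text.lower()
--     for term, raw_weight in terms.items():
--         keyword = str(term).lower()
--         if not keyword:
--             continue
--         if keyword in text:
--             weight = int(raw_weight)
--             score += weight
--             reasons.append(f"{reason_prefix}:{term}{weight:+d}")
--     return score, reasons
-- ===== SOURCE B (Python) =====
-- def match_weighted_terms(text: str, terms: dict, reason_prefix: str) -> tuple[int, list[str]]: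
--     low = text.lower()
--     n = len(low)
--     # index: every substring of `low` whose length is the length of some keyword
--     lens = {len(str(t).lower()) for t in terms if str(t).lower()}
--     subs = {low[i:i + L] for L in lens for i in range(n - L + 1)}
--     hits = [(term, int(raw_weight)) for term, raw_weight in terms.items()
--             if str(term).lower() and str(term).lower() in subs]
--     score = sum(w for _, w in hits)
--     reasons = [f"{reason_prefix}:{term}{w:+d}" for term, w in hits]
--     return score, reasons
-- ===== Notes on version B (the rewrite author's own statement) =====
-- stated objective: alternative
-- what changed: B builds a set index of all substrings of the lowered text at the keyword lengths once, then decides each term by one O(1)-expected set lookup and assembles the result as filter + sum + map instead of A's per-term scan of the text inside one accumulator loop.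
import Mathlib
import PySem

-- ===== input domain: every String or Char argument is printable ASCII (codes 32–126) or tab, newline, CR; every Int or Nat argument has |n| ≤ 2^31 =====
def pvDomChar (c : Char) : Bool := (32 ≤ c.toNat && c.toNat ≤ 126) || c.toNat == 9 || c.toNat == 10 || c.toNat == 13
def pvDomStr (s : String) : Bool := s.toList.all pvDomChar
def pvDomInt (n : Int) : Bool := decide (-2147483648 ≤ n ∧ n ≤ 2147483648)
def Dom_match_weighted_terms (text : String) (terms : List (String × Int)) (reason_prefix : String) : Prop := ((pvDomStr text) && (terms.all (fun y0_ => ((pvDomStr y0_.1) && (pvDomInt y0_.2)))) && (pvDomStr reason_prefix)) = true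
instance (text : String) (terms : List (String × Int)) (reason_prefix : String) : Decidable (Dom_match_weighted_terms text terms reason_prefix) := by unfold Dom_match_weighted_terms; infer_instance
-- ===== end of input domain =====

-- B replaces A's per-term substring scan of the text by a substring-set index built once,
-- then a filter/sum/map pass over the terms; alternative structure, same exact results.

-- ===== PORT A =====
-- shared by both ports: the f-string f"{reason_prefix}:{term}{weight:+d}" (both Pythons contain it verbatim)
def pvReason (reason_prefix term : String) (weight : Int) : String :=
  PySem.Str.join "" [reason_prefix, ":", term,
    if 0 ≤ weight then PySem.Str.join "" ["+", PySem.Int.toStr weight] else PySem.Int.toStr weight]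

def match_weighted_terms (text : String) (terms : List (String × Int)) (reason_prefix : String) : Int × List String :=
  let low := PySem.Str.lower text
  terms.foldl (fun acc tr =>
      let keyword := PySem.Str.lower tr.1
      if keyword = "" then acc
      else if PySem.Str.isIn keyword low then
        (acc.1 + tr.2, acc.2 ++ [pvReason reason_prefix tr.1 tr.2])
      else acc)
    ((0 : Int), ([] : List String))

-- ===== PORT B =====
-- lens = {len(str(t).lower()) for t in terms if str(t).lower()}
def pvLens (terms : List (String × Int)) : PySem.Set Int :=
  PySem.Set.ofList (terms.filterMap (fun tr =>
    let k := PySem.Str.lower tr.1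
    if k = "" then none else some (PySem.Str.len k)))

-- subs = {low[i:i+L] for L in lens for i in range(n - L + 1)}
def pvSubs (low : String) (n : Int) (lens : PySem.Set Int) : PySem.Set String :=
  lens.foldl (fun s L =>
      (PySem.List.pyRange 0 (n - L + 1) 1).foldl
        (fun s i => PySem.Set.add s (PySem.Str.slice low (some i) (some (i + L)))) s)
    PySem.Set.empty

def match_weighted_terms_alt (text : String) (terms : List (String × Int)) (reason_prefix : String) : Int × List String :=
  let low := PySem.Str.lower text
  let n := PySem.Str.len low
  let subs := pvSubs low n (pvLens terms)
  let hits := terms.filter (fun tr =>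
      let k := PySem.Str.lower tr.1
      decide (k ≠ "") && decide (k ∈ subs))
  ((hits.map (fun tr => tr.2)).sum, hits.map (fun tr => pvReason reason_prefix tr.1 tr.2))

-- ===== PRECONDITION & SPEC =====
def Spec_match_weighted_terms (text : String) (terms : List (String × Int)) (reason_prefix : String) (out : Int × List String) : Prop := out = match_weighted_terms_alt text terms reason_prefix
instance (text : String) (terms : List (String × Int)) (reason_prefix : String) (out : Int × List String) : Decidable (Spec_match_weighted_terms text terms reason_prefix out) := by unfold Spec_match_weighted_terms; infer_instance

-- ===== CLAIM (what is proved, stated in full; the proofs are below) =====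
def Claim_equal_match_weighted_terms : Prop := ∀ (text : String) (terms : List (String × Int)) (reason_prefix : String), Dom_match_weighted_terms text terms reason_prefix → Spec_match_weighted_terms text terms reason_prefix (match_weighted_terms text terms reason_prefix)

-- ===== LEMMAS AND PROOFS =====

-- membership in the nested set-comprehension fold of pvSubs
lemma mem_pvSubs_aux (low : String) (n : Int) (ls : List Int) (s0 : PySem.Set String) (k : String) :
    k ∈ ls.foldl (fun s L =>
      (PySem.List.pyRange 0 (n - L + 1) 1).foldl
        (fun s i => PySem.Set.add s (PySem.Str.slice low (some i) (some (i + L)))) s) s0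
      ↔ k ∈ s0 ∨ ∃ L ∈ ls, ∃ i ∈ PySem.List.pyRange 0 (n - L + 1) 1,
          k = PySem.Str.slice low (some i) (some (i + L)) := by
  induction ls generalizing s0 with
  | nil => simp
  | cons L tl ih =>
    rw [List.foldl_cons, ih, PySem.Set.mem_foldl_add]
    simp only [List.mem_cons]
    constructor
    · rintro ((h | ⟨i, hi, hik⟩) | ⟨L', hL', rest⟩)
      exacts [Or.inl h, Or.inr ⟨L, Or.inl rfl, i, hi, hik⟩, Or.inr ⟨L', Or.inr hL', rest⟩]
    · rintro (h | ⟨L', (rfl | hL'), rest⟩)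
      exacts [Or.inl (Or.inl h), Or.inl (Or.inr rest), Or.inr ⟨L', hL', rest⟩]

lemma mem_pvSubs (low : String) (n : Int) (lens : PySem.Set Int) (k : String) :
    k ∈ pvSubs low n lens ↔
      ∃ L ∈ (lens : List Int), ∃ i ∈ PySem.List.pyRange 0 (n - L + 1) 1,
        k = PySem.Str.slice low (some i) (some (i + L)) := by
  unfold pvSubs
  rw [mem_pvSubs_aux]
  simp [PySem.Set.empty]

-- a slice of `low` at a keyword length occurs in `low`; conversely an occurring keyword is such a slice
lemma mem_pvSubs_iff_isIn (low k : String) (lens : PySem.Set Int)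
    (hk : k ≠ "") (hL : PySem.Str.len k ∈ (lens : List Int))
    (hnn : ∀ L ∈ (lens : List Int), 0 ≤ L) :
    k ∈ pvSubs low (PySem.Str.len low) lens ↔ PySem.Str.isIn k low = true := by
  constructor
  · intro hmem
    rw [mem_pvSubs] at hmem
    obtain ⟨L, hLmem, i, hi, hkeq⟩ := hmem
    have h0L := hnn L hLmem
    have h0i : (0 : Int) ≤ i := (PySem.List.mem_pyRange_one.mp hi).1
    rw [PySem.Str.isIn_iff_infix, hkeq]
    have ht : (PySem.Str.slice low (some i) (some (i + L))).toList
        = List.take ((i + L).toNat - i.toNat) (List.drop i.toNat low.toList) := by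
      rw [PySem.Str.toList_slice, PySem.Chars.slice_eq_listSlice,
        PySem.List.slice_toNat _ h0i (by omega)]
    rw [ht]
    exact ((List.take_prefix _ _).isInfix).trans ((List.drop_suffix _ _).isInfix)
  · intro hin
    have hin' : PySem.Chars.isIn k.toList low.toList = true := by simpa using hin
    obtain ⟨j, hpre⟩ := (PySem.Chars.exists_prefix_drop_iff_isIn k.toList low.toList).mpr hin'
    have hkne : k.toList ≠ [] := by
      intro h0
      exact hk (String.toList_inj.mp (h0.trans (by decide)))
    have hkpos : 0 < k.toList.length :=
      Nat.pos_of_ne_zero (fun h => hkne (List.eq_nil_of_length_eq_zero h))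
    have hlen := hpre.length_le
    rw [List.length_drop] at hlen
    rw [mem_pvSubs]
    refine ⟨PySem.Str.len k, hL, (j : Int), ?_, ?_⟩
    · rw [PySem.List.mem_pyRange_one]
      refine ⟨Int.natCast_nonneg j, ?_⟩
      simp only [PySem.Str.len_eq]
      omega
    · rw [← String.toList_inj, PySem.Str.toList_slice, PySem.Chars.slice_eq_listSlice,
        PySem.Str.len_eq, PySem.List.slice_natCast_add low.toList j k.toList.length]
      exact List.prefix_iff_eq_take.mp hpre

lemma pvLens_nonneg (terms : List (String × Int)) : ∀ L ∈ (pvLens terms : List Int), 0 ≤ L := by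
  intro L hmem
  unfold pvLens at hmem
  rw [PySem.Set.mem_ofList, List.mem_filterMap] at hmem
  obtain ⟨tr, -, hf⟩ := hmem
  dsimp only at hf
  split at hf
  · exact absurd hf (by simp)
  · injection hf with h
    rw [← h, PySem.Str.len_eq]
    exact Int.natCast_nonneg _

lemma pvLens_mem (terms : List (String × Int)) (tr : String × Int) (htr : tr ∈ terms)
    (hk : PySem.Str.lower tr.1 ≠ "") :
    PySem.Str.len (PySem.Str.lower tr.1) ∈ (pvLens terms : List Int) := by
  unfold pvLens
  rw [PySem.Set.mem_ofList, List.mem_filterMap]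
  exact ⟨tr, htr, by simp [hk]⟩

-- the single accumulator loop of A computed as filter + sum + map
lemma foldl_push_eq (l : List (String × Int)) (p : String × Int → Bool)
    (r : String × Int → String) (s0 : Int) (rs0 : List String) :
    l.foldl (fun acc tr => if p tr then (acc.1 + tr.2, acc.2 ++ [r tr]) else acc) (s0, rs0)
      = (s0 + ((l.filter p).map (fun tr => tr.2)).sum, rs0 ++ (l.filter p).map r) := by
  induction l generalizing s0 rs0 with
  | nil => simp
  | cons hd tl ih =>
      by_cases hp : p hd
      · simp [hp, ih, add_assoc]
      · simp [hp, ih]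

-- ===== VERDICT (by name: the statement is the Claim_ definition above) =====
theorem match_weighted_terms_spec : Claim_equal_match_weighted_terms := by
  intro text terms reason_prefix _hdom
  unfold Spec_match_weighted_terms match_weighted_terms match_weighted_terms_alt
  simp only []
  rw [PySem.List.foldl_congr_mem _ _
    (fun acc tr => if ((fun tr => decide (PySem.Str.lower tr.1 ≠ "") &&
        decide (PySem.Str.lower tr.1 ∈ pvSubs (PySem.Str.lower text) (PySem.Str.len (PySem.Str.lower text)) (pvLens terms))) tr)
      then (acc.1 + tr.2, acc.2 ++ [pvReason reason_prefix tr.1 tr.2]) else acc) _ ?_]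
  · rw [foldl_push_eq]
    simp
  · intro acc tr htr
    dsimp only
    by_cases hk : PySem.Str.lower tr.1 = ""
    · rw [if_pos hk, if_neg]
      simp [hk]
    · rw [if_neg hk]
      have hiff := mem_pvSubs_iff_isIn (PySem.Str.lower text) (PySem.Str.lower tr.1) (pvLens terms)
        hk (pvLens_mem terms tr htr hk) (pvLens_nonneg terms)
      by_cases hin : PySem.Str.isIn (PySem.Str.lower tr.1) (PySem.Str.lower text) = true
      · rw [if_pos hin, if_pos]
        rw [Bool.and_eq_true, decide_eq_true_eq, decide_eq_true_eq]
        exact ⟨hk, hiff.mpr hin⟩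
      · rw [if_neg hin, if_neg]
        rw [Bool.and_eq_true, decide_eq_true_eq, decide_eq_true_eq]
        rintro ⟨-, hmem⟩
        exact hin (hiff.mp hmem)
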